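-- pv_equiv track=rewrite | github.com/tijeco/FUSTr | HeaderPattern.py | stringSplitter
-- ===== SOURCE A (Python) =====
-- def stringSplitter(string):
--     finalString = ""
--     numSpecialChar = 0
--     for i in string:
--         specialCharacterBool= (not i.isdigit() and not i.isalpha() and i!='-')
--         if specialCharacterBool:
--             numSpecialChar+=1
--         else:
--             if numSpecialChar > 0:
--                 finalString+="_"
--             finalString+=i
--             numSpecialChar = 0
--     return finalString
-- ===== SOURCE B (Python) =====
-- def stringSplitter(string):
--     def special(c):
--         return not c.isdigit() and not c.isalpha() and c != '-'
--     parts = []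
--     seen_special = False
--     i = 0
--     n = len(string)
--     while i < n:
--         j = i
--         k = special(string[i])
--         while j < n and special(string[j]) == k:
--             j += 1
--         if k:
--             seen_special = True
--         else:
--             if seen_special:
--                 parts.append("_")
--             parts.append(string[i:j])
--             seen_special = False
--         i = j
--     return "".join(parts)
-- ===== Notes on version B (the rewrite author's own statement) =====
-- stated objective: alternative
-- what changed: B scans the string as maximal runs of special/non-special characters with two indices and a seen_special flag, appending whole slices to a parts list joined at the end, instead of A's per-character loop with an underscore counter and string concatenation.
import Mathlib
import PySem

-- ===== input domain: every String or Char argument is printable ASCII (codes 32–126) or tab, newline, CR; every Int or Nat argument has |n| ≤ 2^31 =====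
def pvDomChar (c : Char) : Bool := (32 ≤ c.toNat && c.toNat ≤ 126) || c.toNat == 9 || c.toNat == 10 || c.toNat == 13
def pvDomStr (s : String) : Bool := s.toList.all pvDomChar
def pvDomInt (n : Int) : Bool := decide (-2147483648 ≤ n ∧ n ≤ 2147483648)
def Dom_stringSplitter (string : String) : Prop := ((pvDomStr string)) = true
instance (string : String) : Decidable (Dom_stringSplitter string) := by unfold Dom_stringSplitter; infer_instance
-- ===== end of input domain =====

-- B scans the string as maximal special/non-special runs with a seen_special flag and joins
-- collected parts, instead of A's per-character loop with an underscore counter (objective: alternative).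

-- ===== PORT A =====
-- the special-character predicate shared by both Pythons: not i.isdigit() and not i.isalpha() and i != '-'
def pvSpecial (i : Char) : Bool :=
  !(PySem.Chars.isdigit i) && !(PySem.Chars.isalpha i) && i != '-'

-- one iteration of A's for-loop over (finalString, numSpecialChar)
def pvStepA (acc : String × Int) (i : Char) : String × Int :=
  if pvSpecial i then (acc.1, acc.2 + 1)
  else
    let finalString := if acc.2 > 0 then acc.1 ++ "_" else acc.1
    (finalString ++ String.ofList [i], 0)

def stringSplitter (string : String) : String :=
  (string.toList.foldl pvStepA ("", 0)).1

-- ===== PORT B =====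
-- inner while loop of B: take the maximal prefix whose chars have special-key k, return (run-tail, rest)
def pvRun (k : Bool) : List Char → List Char × List Char
  | [] => ([], [])
  | c :: cs =>
    if pvSpecial c == k then
      let p := pvRun k cs
      (c :: p.1, p.2)
    else ([], c :: cs)

theorem pvRun_snd_length_le (k : Bool) (l : List Char) : (pvRun k l).2.length ≤ l.length := by
  induction l with
  | nil => simp [pvRun]
  | cons c cs ih =>
    simp only [pvRun]
    split
    · exact Nat.le_succ_of_le ih
    · simp

-- outer while loop of B over (remaining chars, seen_special, parts)
def pvLoop : List Char → Bool → List String → List String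
  | [], _, parts => parts
  | c :: cs, seen_special, parts =>
    let k := pvSpecial c
    let p := pvRun k cs
    if k then pvLoop p.2 true parts
    else pvLoop p.2 false (parts ++ (if seen_special then ["_"] else []) ++ [String.ofList (c :: p.1)])
  termination_by l => l.length
  decreasing_by all_goals exact Nat.lt_succ_of_le (pvRun_snd_length_le _ _)

def stringSplitter_alt (string : String) : String :=
  String.join (pvLoop string.toList false [])

-- ===== PRECONDITION & SPEC =====
def Spec_stringSplitter (string : String) (out : String) : Prop := out = stringSplitter_alt string
instance (string : String) (out : String) : Decidable (Spec_stringSplitter string out) := by unfold Spec_stringSplitter; infer_instance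

-- ===== CLAIM (what is proved, stated in full; the proofs are below) =====
def Claim_equal_stringSplitter : Prop := ∀ (string : String), Dom_stringSplitter string → Spec_stringSplitter string (stringSplitter string)

-- ===== LEMMAS AND PROOFS =====

theorem pvRun_append (k : Bool) (l : List Char) : (pvRun k l).1 ++ (pvRun k l).2 = l := by
  induction l with
  | nil => simp [pvRun]
  | cons c cs ih =>
    simp only [pvRun]
    split
    · simpa using ih
    · simp

theorem pvRun_mem (k : Bool) (l : List Char) : ∀ c ∈ (pvRun k l).1, pvSpecial c = k := by
  induction l with
  | nil => simp [pvRun]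
  | cons c cs ih =>
    simp only [pvRun]
    split
    · rename_i h
      intro d hd
      rcases List.mem_cons.mp hd with h1 | h2
      · subst h1; exact eq_of_beq h
      · exact ih d h2
    · simp

theorem pvLoop_acc (N : Nat) : ∀ (l : List Char), l.length ≤ N → ∀ (seen : Bool) (parts : List String),
    pvLoop l seen parts = parts ++ pvLoop l seen [] := by
  induction N with
  | zero =>
    intro l hl seen parts
    have : l = [] := List.length_eq_zero_iff.mp (Nat.le_zero.mp hl)
    subst this; simp [pvLoop, String.join]
  | succ N ih =>
    intro l hl seen parts
    cases l with
    | nil => simp [pvLoop, String.join]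
    | cons c cs =>
      have hrest : (pvRun (pvSpecial c) cs).2.length ≤ N :=
        le_trans (pvRun_snd_length_le _ _) (Nat.lt_succ_iff.mp (Nat.lt_of_lt_of_le (by simp) hl))
      by_cases hk : pvSpecial c = true
      · simp only [pvLoop, hk, if_true]
        simp only [hk] at hrest
        exact ih _ hrest true parts
      · have hkf : pvSpecial c = false := by simpa using hk
        simp only [pvLoop, hkf, Bool.false_eq_true, if_false]
        simp only [hkf] at hrest
        rw [ih _ hrest, ih _ hrest (parts := ([] ++ _) ++ _)]
        simp

theorem pvFoldl_append_data (l : List String) (x : String) :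
    (l.foldl (· ++ ·) x).toList = x.toList ++ (l.foldl (· ++ ·) "").toList := by
  induction l generalizing x with
  | nil => simp
  | cons b bs ih =>
    simp only [List.foldl_cons]
    rw [ih (x ++ b), ih ("" ++ b)]
    simp

theorem pvJoin_cons (a : String) (l : List String) :
    (String.join (a :: l)).toList = a.toList ++ (String.join l).toList := by
  simp only [String.join, List.foldl_cons]
  rw [pvFoldl_append_data l ("" ++ a)]
  simp

-- fold of A over an all-special run just bumps the counter
theorem foldA_special (r : List Char) (h : ∀ c ∈ r, pvSpecial c = true) (s : String) (n : Int) :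
    r.foldl pvStepA (s, n) = (s, n + r.length) := by
  induction r generalizing n with
  | nil => simp
  | cons c cs ih =>
    have hc := h c (List.mem_cons_self ..)
    simp only [List.foldl_cons, pvStepA, hc, if_true]
    rw [ih (fun d hd => h d (List.mem_cons_of_mem _ hd))]
    simp; ring

-- fold of A over an all-non-special run with counter 0 appends the run
theorem foldA_plain (r : List Char) (h : ∀ c ∈ r, pvSpecial c = false) (s : String) :
    r.foldl pvStepA (s, 0) = (s ++ String.ofList r, 0) := by
  induction r generalizing s with
  | nil => simp
  | cons c cs ih =>
    have hc := h c (List.mem_cons_self ..)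
    simp only [List.foldl_cons, pvStepA, hc, Bool.false_eq_true, if_false]
    rw [ih (fun d hd => h d (List.mem_cons_of_mem _ hd))]
    simp [String.ext_iff]

-- main invariant: A's fold with counter n ≥ 0 equals s ++ B's loop with seen = (0 < n)
theorem pv_main (N : Nat) : ∀ (l : List Char), l.length ≤ N → ∀ (s : String) (n : Int), 0 ≤ n →
    (l.foldl pvStepA (s, n)).1 = s ++ String.join (pvLoop l (decide (0 < n)) []) := by
  induction N with
  | zero =>
    intro l hl s n _
    have : l = [] := List.length_eq_zero_iff.mp (Nat.le_zero.mp hl)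
    subst this; simp [pvLoop, String.join]
  | succ N ih =>
    intro l hl s n hn
    cases l with
    | nil => simp [pvLoop, String.join]
    | cons c cs =>
      have hsplit := pvRun_append (pvSpecial c) cs
      have hmem := pvRun_mem (pvSpecial c) cs
      have hrest : (pvRun (pvSpecial c) cs).2.length ≤ N :=
        le_trans (pvRun_snd_length_le _ _) (Nat.lt_succ_iff.mp (Nat.lt_of_lt_of_le (by simp) hl))
      set p := pvRun (pvSpecial c) cs with hp
      have hdecomp : c :: cs = (c :: p.1) ++ p.2 := by simp [hsplit]
      conv_lhs => rw [hdecomp, List.foldl_append]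
      by_cases hk : pvSpecial c = true
      · have h1 : (c :: p.1).foldl pvStepA (s, n) = (s, n + 1 + p.1.length) := by
          rw [List.foldl_cons]
          simp only [pvStepA]
          rw [if_pos hk]
          rw [foldA_special p.1 (fun d hd => by rw [hmem d hd, hk]) s (n + 1)]
        rw [h1, ih p.2 hrest s _ (by positivity)]
        have hd : decide (0 < n + 1 + (p.1.length : Int)) = true := by
          simp only [decide_eq_true_eq]; positivity
        rw [hd]
        simp only [pvLoop]
        rw [if_pos hk]
      · have hkf : pvSpecial c = false := by simpa using hk
        have h1 : (c :: p.1).foldl pvStepA (s, n)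
            = ((if n > 0 then s ++ "_" else s) ++ String.ofList (c :: p.1), 0) := by
          rw [List.foldl_cons]
          simp only [pvStepA]
          rw [if_neg (by simp [hkf])]
          rw [foldA_plain p.1 (fun d hd => by rw [hmem d hd, hkf]) _]
          simp [String.ext_iff]
        rw [h1]
        rw [ih p.2 hrest ((if n > 0 then s ++ "_" else s) ++ String.ofList (c :: p.1)) 0 le_rfl]
        simp only [pvLoop]
        rw [if_neg hk]
        conv_rhs => rw [pvLoop_acc p.2.length p.2 le_rfl]
        by_cases hnp : 0 < n
        · simp only [hnp, decide_true, if_pos hnp]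
          simp [String.ext_iff, pvJoin_cons]
          rw [hp]
        · have hz : n = 0 := le_antisymm (not_lt.mp hnp) hn
          subst hz
          simp [String.ext_iff, pvJoin_cons]
          rw [hp]

-- ===== VERDICT (by name: the statement is the Claim_ definition above) =====
theorem stringSplitter_spec : Claim_equal_stringSplitter := by
  intro string _
  unfold Spec_stringSplitter stringSplitter stringSplitter_alt
  have := pv_main string.toList.length string.toList (le_refl _) "" 0 (le_refl 0)
  simpa using this
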